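-- pv_equiv track=rewrite | github.com/akshatg20/sql-parser | YearIndex.py | create_year_bounds
-- ===== SOURCE A (Python) =====
-- def create_year_bounds(years):
-- 	"""
-- 	Given a list of years, create two lists of tuples:
-- 	1. One that stores the smallest year >= the given year for each year between 1900 and 2100.
-- 	2. One that stores the largest year <= the given year for each year between 1900 and 2100.
--
-- 	:param years: List of years
-- 	:return: greater_equal_dict, less_equal_dict
-- 	"""
-- 	# Sort the list of years
-- 	sorted_years = sorted(years)
--
-- 	# Define the range from 1900 to 2100
-- 	full_range = list(range(1900, 2101))
--
-- 	greater_equal_list = []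
-- 	less_equal_list = []
--
-- 	for year in full_range:
-- 		# Find the smallest year >= the given year
-- 		next_smallest_year = next((y for y in sorted_years if y >= year), None)
-- 		greater_equal_list.append((year, next_smallest_year))
--
-- 		# Find the largest year <= the given year
-- 		next_largest_year = next((y for y in reversed(sorted_years) if y <= year), None)
-- 		less_equal_list.append((year, next_largest_year))
--
-- 	return greater_equal_list, less_equal_list
-- ===== SOURCE B (Python) =====
-- def create_year_bounds(years):
--     # Single merge pass: sort once, then advance a cursor through the sorted
--     # years while sweeping the range, instead of scanning the list per year.
--     sorted_years = sorted(years)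
--     n = len(sorted_years)
--
--     greater_equal_list = []
--     j = 0
--     for year in range(1900, 2101):
--         while j < n and sorted_years[j] < year:
--             j += 1
--         greater_equal_list.append((year, sorted_years[j] if j < n else None))
--
--     rev = sorted_years[::-1]
--     less_equal_desc = []
--     j = 0
--     for year in range(2100, 1899, -1):
--         while j < n and rev[j] > year:
--             j += 1
--         less_equal_desc.append((year, rev[j] if j < n else None))
--
--     return greater_equal_list, less_equal_desc[::-1]
-- ===== Notes on version B (the rewrite author's own statement) =====
-- stated objective: faster
-- what changed: Replaces the per-year linear scans of the sorted list (one forward and one backward generator scan for each of the 201 years) by a single sorted merge sweep: one monotone cursor over the sorted list for the >= side and one over its reverse for the <= side.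
import Mathlib
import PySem

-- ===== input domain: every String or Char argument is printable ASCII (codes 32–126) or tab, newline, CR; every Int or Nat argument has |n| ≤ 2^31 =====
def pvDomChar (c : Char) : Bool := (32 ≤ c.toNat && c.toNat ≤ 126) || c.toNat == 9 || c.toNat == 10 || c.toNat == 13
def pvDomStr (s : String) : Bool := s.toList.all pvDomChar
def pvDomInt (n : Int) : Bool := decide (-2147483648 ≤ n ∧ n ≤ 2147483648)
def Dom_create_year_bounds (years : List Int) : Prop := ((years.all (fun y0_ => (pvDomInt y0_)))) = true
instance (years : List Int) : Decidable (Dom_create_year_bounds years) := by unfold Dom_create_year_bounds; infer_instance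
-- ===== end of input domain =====

-- B replaces A's per-year linear scans of the sorted list by a single merge sweep
-- (a monotone cursor over the sorted list, and one over its reverse): faster in a timing run.

-- ===== PORT A =====
-- A: sort, then for each year of range(1900, 2101) scan sorted_years forward for the
-- first y >= year and scan reversed(sorted_years) for the first y <= year, appending to two lists.
def create_year_bounds (years : List Int) : (List (Int × Option Int)) × (List (Int × Option Int)) :=
  let sorted_years := PySem.List.sorted years (fun y => y) false
  let full_range := PySem.List.pyRange 1900 2101 1
  full_range.foldl
    (fun (acc : List (Int × Option Int) × List (Int × Option Int)) year =>
      let next_smallest_year := sorted_years.find? (fun y => decide (year ≤ y))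
      let next_largest_year := sorted_years.reverse.find? (fun y => decide (y ≤ year))
      (acc.1 ++ [(year, next_smallest_year)], acc.2 ++ [(year, next_largest_year)]))
    ([], [])

-- ===== PORT B =====
-- B's forward cursor over the remaining suffix of sorted_years ('while j < n and sorted_years[j] < year: j += 1'):
-- the suffix from the cursor on, advanced with dropWhile.
def geLoopAlt : List Int → List Int → List (Int × Option Int)
  | _, [] => []
  | rem, y :: ys =>
    let rem' := rem.dropWhile (fun a => decide (a < y))
    (y, rem'.head?) :: geLoopAlt rem' ys

-- B's cursor over the reversed sorted list for the descending sweep ('while j < n and rev[j] > year: j += 1').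
def leLoopAlt : List Int → List Int → List (Int × Option Int)
  | _, [] => []
  | rem, y :: ys =>
    let rem' := rem.dropWhile (fun a => decide (y < a))
    (y, rem'.head?) :: leLoopAlt rem' ys

def create_year_bounds_alt (years : List Int) : (List (Int × Option Int)) × (List (Int × Option Int)) :=
  let sorted_years := PySem.List.sorted years (fun y => y) false
  let greater_equal_list := geLoopAlt sorted_years (PySem.List.pyRange 1900 2101 1)
  let less_equal_desc := leLoopAlt sorted_years.reverse (PySem.List.pyRange 2100 1899 (-1))
  (greater_equal_list, less_equal_desc.reverse)

-- ===== PRECONDITION & SPEC =====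
def Spec_create_year_bounds (years : List Int) (out : (List (Int × Option Int)) × (List (Int × Option Int))) : Prop := out = create_year_bounds_alt years
instance (years : List Int) (out : (List (Int × Option Int)) × (List (Int × Option Int))) : Decidable (Spec_create_year_bounds years out) := by unfold Spec_create_year_bounds; infer_instance

-- ===== CLAIM (what is proved, stated in full; the proofs are below) =====
def Claim_equal_create_year_bounds : Prop := ∀ (years : List Int), Dom_create_year_bounds years → Spec_create_year_bounds years (create_year_bounds years)

-- ===== LEMMAS AND PROOFS =====

-- find? is the head of what dropWhile of the negated predicate leaves.
theorem pv_find?_eq_head?_dropWhile {α : Type} (p : α → Bool) (xs : List α) :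
    xs.find? p = (xs.dropWhile (fun a => !p a)).head? := by
  induction xs with
  | nil => rfl
  | cons x xs ih => by_cases h : p x <;> simp [List.find?, List.dropWhile, h, ih]

-- dropWhile over an append whose first part is all-satisfying skips the first part.
theorem pv_dropWhile_append_of_all {α : Type} (p : α → Bool) (l1 l2 : List α)
    (h : ∀ a ∈ l1, p a = true) :
    (l1 ++ l2).dropWhile p = l2.dropWhile p := by
  induction l1 with
  | nil => rfl
  | cons x l1 ih =>
      have hx : p x = true := h x (by simp)
      simp only [List.cons_append, List.dropWhile, hx]
      exact ih (fun a ha => h a (by simp [ha]))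

-- Invariant of B's forward sweep: rem is the suffix of S past elements already
-- known to be below every remaining year; each step answers with dropWhile over S.
theorem pv_geLoopAlt_eq (S : List Int) :
    ∀ (ys pre rem : List Int), S = pre ++ rem →
      (∀ a ∈ pre, ∀ y ∈ ys, a < y) → ys.Pairwise (· ≤ ·) →
      geLoopAlt rem ys
        = ys.map (fun y => (y, (S.dropWhile (fun a => decide (a < y))).head?)) := by
  intro ys
  induction ys with
  | nil => intro pre rem _ _ _; rfl
  | cons y ys ih =>
      intro pre rem hS hpre hpw
      have hpw' := (List.pairwise_cons.mp hpw)
      have hdrop : S.dropWhile (fun a => decide (a < y)) = rem.dropWhile (fun a => decide (a < y)) := by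
        rw [hS]
        exact pv_dropWhile_append_of_all _ _ _ (fun a ha => by
          simpa using hpre a ha y (by simp))
      simp only [geLoopAlt, List.map_cons, hdrop]
      refine congrArg _ ?_
      refine ih (pre ++ rem.takeWhile (fun a => decide (a < y)))
        (rem.dropWhile (fun a => decide (a < y))) ?_ ?_ hpw'.2
      · rw [hS, List.append_assoc, List.takeWhile_append_dropWhile]
      · intro a ha y' hy'
        rcases List.mem_append.mp ha with h1 | h2
        · exact hpre a h1 y' (by simp [hy'])
        · have h3 : a < y := by simpa using List.mem_takeWhile_imp h2
          exact lt_of_lt_of_le h3 (hpw'.1 y' hy')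

-- Mirror invariant for the descending sweep over the reversed sorted list.
theorem pv_leLoopAlt_eq (T : List Int) :
    ∀ (ys pre rem : List Int), T = pre ++ rem →
      (∀ a ∈ pre, ∀ y ∈ ys, y < a) → ys.Pairwise (· ≥ ·) →
      leLoopAlt rem ys
        = ys.map (fun y => (y, (T.dropWhile (fun a => decide (y < a))).head?)) := by
  intro ys
  induction ys with
  | nil => intro pre rem _ _ _; rfl
  | cons y ys ih =>
      intro pre rem hS hpre hpw
      have hpw' := (List.pairwise_cons.mp hpw)
      have hdrop : T.dropWhile (fun a => decide (y < a)) = rem.dropWhile (fun a => decide (y < a)) := by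
        rw [hS]
        exact pv_dropWhile_append_of_all _ _ _ (fun a ha => by
          simpa using hpre a ha y (by simp))
      simp only [leLoopAlt, List.map_cons, hdrop]
      refine congrArg _ ?_
      refine ih (pre ++ rem.takeWhile (fun a => decide (y < a)))
        (rem.dropWhile (fun a => decide (y < a))) ?_ ?_ hpw'.2
      · rw [hS, List.append_assoc, List.takeWhile_append_dropWhile]
      · intro a ha y' hy'
        rcases List.mem_append.mp ha with h1 | h2
        · exact hpre a h1 y' (by simp [hy'])
        · have h3 : y < a := by simpa using List.mem_takeWhile_imp h2
          exact lt_of_le_of_lt (hpw'.1 y' hy') h3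

-- A's appending foldl is the pair of maps over the range.
theorem pv_foldA_eq (S : List Int) :
    ∀ (r : List Int) (acc : List (Int × Option Int) × List (Int × Option Int)),
      r.foldl
        (fun (acc : List (Int × Option Int) × List (Int × Option Int)) year =>
          (acc.1 ++ [(year, S.find? (fun y => decide (year ≤ y)))],
           acc.2 ++ [(year, S.reverse.find? (fun y => decide (y ≤ year)))])) acc
      = (acc.1 ++ r.map (fun year => (year, S.find? (fun y => decide (year ≤ y)))),
         acc.2 ++ r.map (fun year => (year, S.reverse.find? (fun y => decide (y ≤ year))))) := by
  intro r
  induction r with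
  | nil => intro acc; simp
  | cons x r ih => intro acc; simp [List.foldl_cons, ih]

theorem pv_findGE (S : List Int) (year : Int) :
    S.find? (fun y => decide (year ≤ y)) = (S.dropWhile (fun a => decide (a < year))).head? := by
  rw [pv_find?_eq_head?_dropWhile]
  have hp : (fun a : Int => !decide (year ≤ a)) = (fun a : Int => decide (a < year)) := by
    funext a; by_cases h : year ≤ a <;> simp [h] <;> try omega
  rw [hp]

theorem pv_findLE (S : List Int) (year : Int) :
    S.reverse.find? (fun y => decide (y ≤ year)) = (S.reverse.dropWhile (fun a => decide (year < a))).head? := by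
  rw [pv_find?_eq_head?_dropWhile]
  have hp : (fun a : Int => !decide (a ≤ year)) = (fun a : Int => decide (year < a)) := by
    funext a; by_cases h : a ≤ year <;> simp [h] <;> try omega
  rw [hp]

-- ===== VERDICT (by name: the statement is the Claim_ definition above) =====
theorem create_year_bounds_spec : Claim_equal_create_year_bounds := by
  intro years _
  unfold Spec_create_year_bounds create_year_bounds create_year_bounds_alt
  set S := PySem.List.sorted years (fun y => y) false with hSdef
  have hrev : PySem.List.pyRange 2100 1899 (-1) = (PySem.List.pyRange 1900 2101 1).reverse := by
    rw [PySem.List.pyRange_neg_one_eq_reverse]; norm_num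
  have hge : geLoopAlt S (PySem.List.pyRange 1900 2101 1)
      = (PySem.List.pyRange 1900 2101 1).map
          (fun y => (y, (S.dropWhile (fun a => decide (a < y))).head?)) :=
    pv_geLoopAlt_eq S _ [] S rfl (by simp)
      (PySem.List.pairwise_lt_pyRange_one 1900 2101 |>.imp le_of_lt)
  have hle : leLoopAlt S.reverse (PySem.List.pyRange 2100 1899 (-1))
      = ((PySem.List.pyRange 1900 2101 1).reverse).map
          (fun y => (y, (S.reverse.dropWhile (fun a => decide (y < a))).head?)) := by
    rw [hrev]
    exact pv_leLoopAlt_eq S.reverse _ [] S.reverse rfl (by simp)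
      (by
        rw [List.pairwise_reverse]
        exact (PySem.List.pairwise_lt_pyRange_one 1900 2101).imp (fun h => le_of_lt h))
  simp only [hge, hle, pv_foldA_eq S, List.nil_append, List.map_reverse, List.reverse_reverse]
  have h1 : List.map (fun year => ((year : Int), List.find? (fun y => decide (year ≤ y)) S)) (PySem.List.pyRange 1900 2101 1)
      = List.map (fun y => (y, (List.dropWhile (fun a => decide (a < y)) S).head?)) (PySem.List.pyRange 1900 2101 1) :=
    List.map_congr_left (fun y _ => by simp only [pv_findGE S y])
  have h2 : List.map (fun year => ((year : Int), List.find? (fun y => decide (y ≤ year)) S.reverse)) (PySem.List.pyRange 1900 2101 1)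
      = List.map (fun y => (y, (List.dropWhile (fun a => decide (y < a)) S.reverse).head?)) (PySem.List.pyRange 1900 2101 1) :=
    List.map_congr_left (fun y _ => by simp only [pv_findLE S y])
  exact Prod.ext h1 h2
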